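-- pv_equiv track=rewrite | github.com/mombasawalafaizan/dsa_solution | Greedy/die_hard.py | dieHard
-- ===== SOURCE A (Python) =====
-- def dieHard(h, a):
--     elmts = [[-5 , -10], [-20, 5]]
--     cur_place = -1
--     time = 0
--     while h>0 and a>0:
--         if cur_place != 2:
--             h += 3
--             a += 2
--             cur_place = 2
--         else:
--             prev_place = cur_place
--             for i in range(2):
--                 if (elmts[i][0]+h)>0 and (elmts[i][1]+a)>0:
--                     h += elmts[i][0]
--                     a += elmts[i][1]
--                     cur_place = i
--                     break
--             if prev_place == cur_place:
--                 break
--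
--         time += 1
--     return time
-- ===== SOURCE B (Python) =====
-- def dieHard(h, a):
--     # O(1): collapse the greedy simulation into arithmetic phase jumps.
--     if h <= 0 or a <= 0:
--         return 0
--     h += 3
--     a += 2
--     time = 1
--     while True:
--         if h > 5 and a > 10:
--             # bulk of (rest, then water) pairs: each costs (h-2, a-8, +2 steps)
--             k = min((h - 4) // 2, (a - 3) // 8)
--             h -= 2 * k
--             a -= 8 * k
--             time += 2 * k
--         elif h > 20:
--             if h > 170 and 3 <= a:
--                 # a is trapped on a 15-pair cycle (net h-150, a unchanged, +30 steps)
--                 q = (h - 21) // 150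
--                 h -= 150 * q
--                 time += 30 * q
--             else:
--                 h -= 17
--                 a += 7
--                 time += 2
--         else:
--             break
--     return time
-- ===== Notes on version B (the rewrite author's own statement) =====
-- stated objective: faster
-- what changed: Replaces the step-by-step simulation with arithmetic phase jumps: the whole 'rest at place 0 + water' phase is collapsed into one closed-form division, and the long alternating regime (which is a fixed 15-pair cycle with net effect h-150, a unchanged, +30 steps) is skipped in one division, leaving O(1) work.
import Mathlib
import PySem

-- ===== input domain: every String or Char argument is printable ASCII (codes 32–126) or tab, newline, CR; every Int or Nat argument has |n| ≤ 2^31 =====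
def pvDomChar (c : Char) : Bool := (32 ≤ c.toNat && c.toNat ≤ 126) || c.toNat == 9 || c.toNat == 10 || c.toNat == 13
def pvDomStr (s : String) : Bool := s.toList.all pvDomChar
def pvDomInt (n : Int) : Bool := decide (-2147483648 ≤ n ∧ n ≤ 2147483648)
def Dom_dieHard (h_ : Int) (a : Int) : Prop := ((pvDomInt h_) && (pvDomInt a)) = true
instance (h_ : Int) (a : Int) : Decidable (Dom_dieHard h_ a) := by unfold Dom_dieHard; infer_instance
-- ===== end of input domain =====

-- B replaces A's step-by-step greedy simulation with O(1) arithmetic phase jumps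
-- (closed-form count for the place-0 phase, and a one-division skip of the fixed
-- 15-pair alternating cycle); objective: faster.

-- ===== PORT A =====
-- A's while-loop, as recursion over the same state (h, a, cur_place, time).
-- The inner 'for i in range(2): ... break' is unrolled over the two literal
-- elements [-5,-10] and [-20,5] of elmts; 'prev_place == cur_place' holds exactly
-- when neither move fires, which is the final 'else time' (break without counting).
def dieHardLoop (h a cur_place time : Int) : Int :=
  if h > 0 ∧ a > 0 then
    if cur_place ≠ 2 then
      dieHardLoop (h + 3) (a + 2) 2 (time + 1)
    else
      if -5 + h > 0 ∧ -10 + a > 0 then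
        dieHardLoop (h + -5) (a + -10) 0 (time + 1)
      else if -20 + h > 0 ∧ 5 + a > 0 then
        dieHardLoop (h + -20) (a + 5) 1 (time + 1)
      else time
  else time
termination_by (h + a + (if cur_place ≠ 2 then 6 else 0)).toNat
decreasing_by all_goals (split_ifs <;> omega)

def dieHard (h_ : Int) (a : Int) : Int :=
  dieHardLoop h_ a (-1) 0

-- ===== PORT B =====
-- Source B's loop: bulk place-0 phase, periodic-cycle skip, single pair, exit.
def dieHardAltLoop (h a time : Int) : Int :=
  if h > 5 ∧ a > 10 then
    let k := min (PySem.Int.floordiv (h - 4) 2) (PySem.Int.floordiv (a - 3) 8)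
    dieHardAltLoop (h - 2 * k) (a - 8 * k) (time + 2 * k)
  else if h > 20 then
    if h > 170 ∧ 3 ≤ a then
      let q := PySem.Int.floordiv (h - 21) 150
      dieHardAltLoop (h - 150 * q) a (time + 30 * q)
    else
      dieHardAltLoop (h - 17) (a + 7) (time + 2)
  else time
termination_by h.toNat
decreasing_by
  all_goals (try simp only [PySem.Int.floordiv_eq_ediv_of_pos (by norm_num : (0:Int) < 2),
    PySem.Int.floordiv_eq_ediv_of_pos (by norm_num : (0:Int) < 8),
    PySem.Int.floordiv_eq_ediv_of_pos (by norm_num : (0:Int) < 150)] at *)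
  all_goals omega


def dieHard_alt (h_ : Int) (a : Int) : Int :=
  if h_ ≤ 0 ∨ a ≤ 0 then 0
  else dieHardAltLoop (h_ + 3) (a + 2) 1

-- ===== PRECONDITION & SPEC =====
def Spec_dieHard (h_ : Int) (a : Int) (out : Int) : Prop := out = dieHard_alt h_ a
instance (h_ : Int) (a : Int) (out : Int) : Decidable (Spec_dieHard h_ a out) := by unfold Spec_dieHard; infer_instance

-- ===== CLAIM (what is proved, stated in full; the proofs are below) =====
def Claim_equal_dieHard : Prop := ∀ (h_ : Int) (a : Int), Dom_dieHard h_ a → Spec_dieHard h_ a (dieHard h_ a)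

-- ===== LEMMAS AND PROOFS =====
lemma pairA {h a t h' a' t' : Int} (hh : 5 < h) (ha : 10 < a)
    (eh : h' = h - 2) (ea : a' = a - 8) (et : t' = t + 2) :
    dieHardLoop h a 2 t = dieHardLoop h' a' 2 t' := by
  conv_lhs => rw [dieHardLoop]
  rw [if_pos (by omega : h > 0 ∧ a > 0)]
  simp only [ne_eq, not_true_eq_false, if_false]
  rw [if_pos (by omega : -5 + h > 0 ∧ -10 + a > 0)]
  conv_lhs => rw [dieHardLoop]
  rw [if_pos (by omega : h + -5 > 0 ∧ a + -10 > 0)]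
  rw [if_pos (by norm_num : (0:Int) ≠ 2)]
  congr 1 <;> omega

lemma pairB {h a t h' a' t' : Int} (hh : 20 < h) (ha0 : 0 < a) (ha : a ≤ 10)
    (eh : h' = h - 17) (ea : a' = a + 7) (et : t' = t + 2) :
    dieHardLoop h a 2 t = dieHardLoop h' a' 2 t' := by
  conv_lhs => rw [dieHardLoop]
  rw [if_pos (by omega : h > 0 ∧ a > 0)]
  simp only [ne_eq, not_true_eq_false, if_false]
  rw [if_neg (by omega : ¬(-5 + h > 0 ∧ -10 + a > 0))]
  rw [if_pos (by omega : -20 + h > 0 ∧ 5 + a > 0)]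
  conv_lhs => rw [dieHardLoop]
  rw [if_pos (by omega : h + -20 > 0 ∧ a + 5 > 0)]
  rw [if_pos (by norm_num : (1:Int) ≠ 2)]
  congr 1 <;> omega

lemma loopA_exit {h a : Int} (t : Int) (hh0 : 0 < h) (ha0 : 0 < a)
    (hno : ¬(5 < h ∧ 10 < a)) (hle : h ≤ 20) :
    dieHardLoop h a 2 t = t := by
  rw [dieHardLoop]
  rw [if_pos (by omega : h > 0 ∧ a > 0)]
  simp only [ne_eq, not_true_eq_false, if_false]
  rw [if_neg (by omega : ¬(-5 + h > 0 ∧ -10 + a > 0))]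
  rw [if_neg (by omega : ¬(-20 + h > 0 ∧ 5 + a > 0))]

lemma bulkA : ∀ (n : Nat) (h a t : Int), 3 + 2 * n < h → 2 + 8 * n < a →
    dieHardLoop h a 2 t = dieHardLoop (h - 2 * n) (a - 8 * n) 2 (t + 2 * n) := by
  intro n
  induction n with
  | zero => intro h a t _ _; norm_num
  | succ m ih =>
    intro h a t hh ha
    rw [pairA (by omega) (by omega) rfl rfl rfl]
    rw [ih (h - 2) (a - 8) (t + 2) (by push_cast at hh ⊢; omega)
      (by push_cast at ha ⊢; omega)]
    congr 1 <;> push_cast <;> ring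

lemma cycleA {h : Int} (a t : Int) (hh : 170 < h) (h3 : 3 ≤ a) (h10 : a ≤ 10) :
    dieHardLoop h a 2 t = dieHardLoop (h - 150) a 2 (t + 30) := by
  interval_cases a
  · calc dieHardLoop h 3 2 t = dieHardLoop (h - 17) 10 2 (t + 2) := pairB (by omega) (by omega) (by omega) (by omega) (by omega) (by omega)
    _ = dieHardLoop (h - 34) 17 2 (t + 4) := pairB (by omega) (by omega) (by omega) (by omega) (by omega) (by omega)
    _ = dieHardLoop (h - 36) 9 2 (t + 6) := pairA (by omega) (by omega) (by omega) (by omega) (by omega)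
    _ = dieHardLoop (h - 53) 16 2 (t + 8) := pairB (by omega) (by omega) (by omega) (by omega) (by omega) (by omega)
    _ = dieHardLoop (h - 55) 8 2 (t + 10) := pairA (by omega) (by omega) (by omega) (by omega) (by omega)
    _ = dieHardLoop (h - 72) 15 2 (t + 12) := pairB (by omega) (by omega) (by omega) (by omega) (by omega) (by omega)
    _ = dieHardLoop (h - 74) 7 2 (t + 14) := pairA (by omega) (by omega) (by omega) (by omega) (by omega)
    _ = dieHardLoop (h - 91) 14 2 (t + 16) := pairB (by omega) (by omega) (by omega) (by omega) (by omega) (by omega)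
    _ = dieHardLoop (h - 93) 6 2 (t + 18) := pairA (by omega) (by omega) (by omega) (by omega) (by omega)
    _ = dieHardLoop (h - 110) 13 2 (t + 20) := pairB (by omega) (by omega) (by omega) (by omega) (by omega) (by omega)
    _ = dieHardLoop (h - 112) 5 2 (t + 22) := pairA (by omega) (by omega) (by omega) (by omega) (by omega)
    _ = dieHardLoop (h - 129) 12 2 (t + 24) := pairB (by omega) (by omega) (by omega) (by omega) (by omega) (by omega)
    _ = dieHardLoop (h - 131) 4 2 (t + 26) := pairA (by omega) (by omega) (by omega) (by omega) (by omega)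
    _ = dieHardLoop (h - 148) 11 2 (t + 28) := pairB (by omega) (by omega) (by omega) (by omega) (by omega) (by omega)
    _ = dieHardLoop (h - 150) 3 2 (t + 30) := pairA (by omega) (by omega) (by omega) (by omega) (by omega)
  · calc dieHardLoop h 4 2 t = dieHardLoop (h - 17) 11 2 (t + 2) := pairB (by omega) (by omega) (by omega) (by omega) (by omega) (by omega)
    _ = dieHardLoop (h - 19) 3 2 (t + 4) := pairA (by omega) (by omega) (by omega) (by omega) (by omega)
    _ = dieHardLoop (h - 36) 10 2 (t + 6) := pairB (by omega) (by omega) (by omega) (by omega) (by omega) (by omega)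
    _ = dieHardLoop (h - 53) 17 2 (t + 8) := pairB (by omega) (by omega) (by omega) (by omega) (by omega) (by omega)
    _ = dieHardLoop (h - 55) 9 2 (t + 10) := pairA (by omega) (by omega) (by omega) (by omega) (by omega)
    _ = dieHardLoop (h - 72) 16 2 (t + 12) := pairB (by omega) (by omega) (by omega) (by omega) (by omega) (by omega)
    _ = dieHardLoop (h - 74) 8 2 (t + 14) := pairA (by omega) (by omega) (by omega) (by omega) (by omega)
    _ = dieHardLoop (h - 91) 15 2 (t + 16) := pairB (by omega) (by omega) (by omega) (by omega) (by omega) (by omega)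
    _ = dieHardLoop (h - 93) 7 2 (t + 18) := pairA (by omega) (by omega) (by omega) (by omega) (by omega)
    _ = dieHardLoop (h - 110) 14 2 (t + 20) := pairB (by omega) (by omega) (by omega) (by omega) (by omega) (by omega)
    _ = dieHardLoop (h - 112) 6 2 (t + 22) := pairA (by omega) (by omega) (by omega) (by omega) (by omega)
    _ = dieHardLoop (h - 129) 13 2 (t + 24) := pairB (by omega) (by omega) (by omega) (by omega) (by omega) (by omega)
    _ = dieHardLoop (h - 131) 5 2 (t + 26) := pairA (by omega) (by omega) (by omega) (by omega) (by omega)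
    _ = dieHardLoop (h - 148) 12 2 (t + 28) := pairB (by omega) (by omega) (by omega) (by omega) (by omega) (by omega)
    _ = dieHardLoop (h - 150) 4 2 (t + 30) := pairA (by omega) (by omega) (by omega) (by omega) (by omega)
  · calc dieHardLoop h 5 2 t = dieHardLoop (h - 17) 12 2 (t + 2) := pairB (by omega) (by omega) (by omega) (by omega) (by omega) (by omega)
    _ = dieHardLoop (h - 19) 4 2 (t + 4) := pairA (by omega) (by omega) (by omega) (by omega) (by omega)
    _ = dieHardLoop (h - 36) 11 2 (t + 6) := pairB (by omega) (by omega) (by omega) (by omega) (by omega) (by omega)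
    _ = dieHardLoop (h - 38) 3 2 (t + 8) := pairA (by omega) (by omega) (by omega) (by omega) (by omega)
    _ = dieHardLoop (h - 55) 10 2 (t + 10) := pairB (by omega) (by omega) (by omega) (by omega) (by omega) (by omega)
    _ = dieHardLoop (h - 72) 17 2 (t + 12) := pairB (by omega) (by omega) (by omega) (by omega) (by omega) (by omega)
    _ = dieHardLoop (h - 74) 9 2 (t + 14) := pairA (by omega) (by omega) (by omega) (by omega) (by omega)
    _ = dieHardLoop (h - 91) 16 2 (t + 16) := pairB (by omega) (by omega) (by omega) (by omega) (by omega) (by omega)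
    _ = dieHardLoop (h - 93) 8 2 (t + 18) := pairA (by omega) (by omega) (by omega) (by omega) (by omega)
    _ = dieHardLoop (h - 110) 15 2 (t + 20) := pairB (by omega) (by omega) (by omega) (by omega) (by omega) (by omega)
    _ = dieHardLoop (h - 112) 7 2 (t + 22) := pairA (by omega) (by omega) (by omega) (by omega) (by omega)
    _ = dieHardLoop (h - 129) 14 2 (t + 24) := pairB (by omega) (by omega) (by omega) (by omega) (by omega) (by omega)
    _ = dieHardLoop (h - 131) 6 2 (t + 26) := pairA (by omega) (by omega) (by omega) (by omega) (by omega)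
    _ = dieHardLoop (h - 148) 13 2 (t + 28) := pairB (by omega) (by omega) (by omega) (by omega) (by omega) (by omega)
    _ = dieHardLoop (h - 150) 5 2 (t + 30) := pairA (by omega) (by omega) (by omega) (by omega) (by omega)
  · calc dieHardLoop h 6 2 t = dieHardLoop (h - 17) 13 2 (t + 2) := pairB (by omega) (by omega) (by omega) (by omega) (by omega) (by omega)
    _ = dieHardLoop (h - 19) 5 2 (t + 4) := pairA (by omega) (by omega) (by omega) (by omega) (by omega)
    _ = dieHardLoop (h - 36) 12 2 (t + 6) := pairB (by omega) (by omega) (by omega) (by omega) (by omega) (by omega)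
    _ = dieHardLoop (h - 38) 4 2 (t + 8) := pairA (by omega) (by omega) (by omega) (by omega) (by omega)
    _ = dieHardLoop (h - 55) 11 2 (t + 10) := pairB (by omega) (by omega) (by omega) (by omega) (by omega) (by omega)
    _ = dieHardLoop (h - 57) 3 2 (t + 12) := pairA (by omega) (by omega) (by omega) (by omega) (by omega)
    _ = dieHardLoop (h - 74) 10 2 (t + 14) := pairB (by omega) (by omega) (by omega) (by omega) (by omega) (by omega)
    _ = dieHardLoop (h - 91) 17 2 (t + 16) := pairB (by omega) (by omega) (by omega) (by omega) (by omega) (by omega)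
    _ = dieHardLoop (h - 93) 9 2 (t + 18) := pairA (by omega) (by omega) (by omega) (by omega) (by omega)
    _ = dieHardLoop (h - 110) 16 2 (t + 20) := pairB (by omega) (by omega) (by omega) (by omega) (by omega) (by omega)
    _ = dieHardLoop (h - 112) 8 2 (t + 22) := pairA (by omega) (by omega) (by omega) (by omega) (by omega)
    _ = dieHardLoop (h - 129) 15 2 (t + 24) := pairB (by omega) (by omega) (by omega) (by omega) (by omega) (by omega)
    _ = dieHardLoop (h - 131) 7 2 (t + 26) := pairA (by omega) (by omega) (by omega) (by omega) (by omega)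
    _ = dieHardLoop (h - 148) 14 2 (t + 28) := pairB (by omega) (by omega) (by omega) (by omega) (by omega) (by omega)
    _ = dieHardLoop (h - 150) 6 2 (t + 30) := pairA (by omega) (by omega) (by omega) (by omega) (by omega)
  · calc dieHardLoop h 7 2 t = dieHardLoop (h - 17) 14 2 (t + 2) := pairB (by omega) (by omega) (by omega) (by omega) (by omega) (by omega)
    _ = dieHardLoop (h - 19) 6 2 (t + 4) := pairA (by omega) (by omega) (by omega) (by omega) (by omega)
    _ = dieHardLoop (h - 36) 13 2 (t + 6) := pairB (by omega) (by omega) (by omega) (by omega) (by omega) (by omega)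
    _ = dieHardLoop (h - 38) 5 2 (t + 8) := pairA (by omega) (by omega) (by omega) (by omega) (by omega)
    _ = dieHardLoop (h - 55) 12 2 (t + 10) := pairB (by omega) (by omega) (by omega) (by omega) (by omega) (by omega)
    _ = dieHardLoop (h - 57) 4 2 (t + 12) := pairA (by omega) (by omega) (by omega) (by omega) (by omega)
    _ = dieHardLoop (h - 74) 11 2 (t + 14) := pairB (by omega) (by omega) (by omega) (by omega) (by omega) (by omega)
    _ = dieHardLoop (h - 76) 3 2 (t + 16) := pairA (by omega) (by omega) (by omega) (by omega) (by omega)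
    _ = dieHardLoop (h - 93) 10 2 (t + 18) := pairB (by omega) (by omega) (by omega) (by omega) (by omega) (by omega)
    _ = dieHardLoop (h - 110) 17 2 (t + 20) := pairB (by omega) (by omega) (by omega) (by omega) (by omega) (by omega)
    _ = dieHardLoop (h - 112) 9 2 (t + 22) := pairA (by omega) (by omega) (by omega) (by omega) (by omega)
    _ = dieHardLoop (h - 129) 16 2 (t + 24) := pairB (by omega) (by omega) (by omega) (by omega) (by omega) (by omega)
    _ = dieHardLoop (h - 131) 8 2 (t + 26) := pairA (by omega) (by omega) (by omega) (by omega) (by omega)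
    _ = dieHardLoop (h - 148) 15 2 (t + 28) := pairB (by omega) (by omega) (by omega) (by omega) (by omega) (by omega)
    _ = dieHardLoop (h - 150) 7 2 (t + 30) := pairA (by omega) (by omega) (by omega) (by omega) (by omega)
  · calc dieHardLoop h 8 2 t = dieHardLoop (h - 17) 15 2 (t + 2) := pairB (by omega) (by omega) (by omega) (by omega) (by omega) (by omega)
    _ = dieHardLoop (h - 19) 7 2 (t + 4) := pairA (by omega) (by omega) (by omega) (by omega) (by omega)
    _ = dieHardLoop (h - 36) 14 2 (t + 6) := pairB (by omega) (by omega) (by omega) (by omega) (by omega) (by omega)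
    _ = dieHardLoop (h - 38) 6 2 (t + 8) := pairA (by omega) (by omega) (by omega) (by omega) (by omega)
    _ = dieHardLoop (h - 55) 13 2 (t + 10) := pairB (by omega) (by omega) (by omega) (by omega) (by omega) (by omega)
    _ = dieHardLoop (h - 57) 5 2 (t + 12) := pairA (by omega) (by omega) (by omega) (by omega) (by omega)
    _ = dieHardLoop (h - 74) 12 2 (t + 14) := pairB (by omega) (by omega) (by omega) (by omega) (by omega) (by omega)
    _ = dieHardLoop (h - 76) 4 2 (t + 16) := pairA (by omega) (by omega) (by omega) (by omega) (by omega)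
    _ = dieHardLoop (h - 93) 11 2 (t + 18) := pairB (by omega) (by omega) (by omega) (by omega) (by omega) (by omega)
    _ = dieHardLoop (h - 95) 3 2 (t + 20) := pairA (by omega) (by omega) (by omega) (by omega) (by omega)
    _ = dieHardLoop (h - 112) 10 2 (t + 22) := pairB (by omega) (by omega) (by omega) (by omega) (by omega) (by omega)
    _ = dieHardLoop (h - 129) 17 2 (t + 24) := pairB (by omega) (by omega) (by omega) (by omega) (by omega) (by omega)
    _ = dieHardLoop (h - 131) 9 2 (t + 26) := pairA (by omega) (by omega) (by omega) (by omega) (by omega)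
    _ = dieHardLoop (h - 148) 16 2 (t + 28) := pairB (by omega) (by omega) (by omega) (by omega) (by omega) (by omega)
    _ = dieHardLoop (h - 150) 8 2 (t + 30) := pairA (by omega) (by omega) (by omega) (by omega) (by omega)
  · calc dieHardLoop h 9 2 t = dieHardLoop (h - 17) 16 2 (t + 2) := pairB (by omega) (by omega) (by omega) (by omega) (by omega) (by omega)
    _ = dieHardLoop (h - 19) 8 2 (t + 4) := pairA (by omega) (by omega) (by omega) (by omega) (by omega)
    _ = dieHardLoop (h - 36) 15 2 (t + 6) := pairB (by omega) (by omega) (by omega) (by omega) (by omega) (by omega)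
    _ = dieHardLoop (h - 38) 7 2 (t + 8) := pairA (by omega) (by omega) (by omega) (by omega) (by omega)
    _ = dieHardLoop (h - 55) 14 2 (t + 10) := pairB (by omega) (by omega) (by omega) (by omega) (by omega) (by omega)
    _ = dieHardLoop (h - 57) 6 2 (t + 12) := pairA (by omega) (by omega) (by omega) (by omega) (by omega)
    _ = dieHardLoop (h - 74) 13 2 (t + 14) := pairB (by omega) (by omega) (by omega) (by omega) (by omega) (by omega)
    _ = dieHardLoop (h - 76) 5 2 (t + 16) := pairA (by omega) (by omega) (by omega) (by omega) (by omega)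
    _ = dieHardLoop (h - 93) 12 2 (t + 18) := pairB (by omega) (by omega) (by omega) (by omega) (by omega) (by omega)
    _ = dieHardLoop (h - 95) 4 2 (t + 20) := pairA (by omega) (by omega) (by omega) (by omega) (by omega)
    _ = dieHardLoop (h - 112) 11 2 (t + 22) := pairB (by omega) (by omega) (by omega) (by omega) (by omega) (by omega)
    _ = dieHardLoop (h - 114) 3 2 (t + 24) := pairA (by omega) (by omega) (by omega) (by omega) (by omega)
    _ = dieHardLoop (h - 131) 10 2 (t + 26) := pairB (by omega) (by omega) (by omega) (by omega) (by omega) (by omega)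
    _ = dieHardLoop (h - 148) 17 2 (t + 28) := pairB (by omega) (by omega) (by omega) (by omega) (by omega) (by omega)
    _ = dieHardLoop (h - 150) 9 2 (t + 30) := pairA (by omega) (by omega) (by omega) (by omega) (by omega)
  · calc dieHardLoop h 10 2 t = dieHardLoop (h - 17) 17 2 (t + 2) := pairB (by omega) (by omega) (by omega) (by omega) (by omega) (by omega)
    _ = dieHardLoop (h - 19) 9 2 (t + 4) := pairA (by omega) (by omega) (by omega) (by omega) (by omega)
    _ = dieHardLoop (h - 36) 16 2 (t + 6) := pairB (by omega) (by omega) (by omega) (by omega) (by omega) (by omega)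
    _ = dieHardLoop (h - 38) 8 2 (t + 8) := pairA (by omega) (by omega) (by omega) (by omega) (by omega)
    _ = dieHardLoop (h - 55) 15 2 (t + 10) := pairB (by omega) (by omega) (by omega) (by omega) (by omega) (by omega)
    _ = dieHardLoop (h - 57) 7 2 (t + 12) := pairA (by omega) (by omega) (by omega) (by omega) (by omega)
    _ = dieHardLoop (h - 74) 14 2 (t + 14) := pairB (by omega) (by omega) (by omega) (by omega) (by omega) (by omega)
    _ = dieHardLoop (h - 76) 6 2 (t + 16) := pairA (by omega) (by omega) (by omega) (by omega) (by omega)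
    _ = dieHardLoop (h - 93) 13 2 (t + 18) := pairB (by omega) (by omega) (by omega) (by omega) (by omega) (by omega)
    _ = dieHardLoop (h - 95) 5 2 (t + 20) := pairA (by omega) (by omega) (by omega) (by omega) (by omega)
    _ = dieHardLoop (h - 112) 12 2 (t + 22) := pairB (by omega) (by omega) (by omega) (by omega) (by omega) (by omega)
    _ = dieHardLoop (h - 114) 4 2 (t + 24) := pairA (by omega) (by omega) (by omega) (by omega) (by omega)
    _ = dieHardLoop (h - 131) 11 2 (t + 26) := pairB (by omega) (by omega) (by omega) (by omega) (by omega) (by omega)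
    _ = dieHardLoop (h - 133) 3 2 (t + 28) := pairA (by omega) (by omega) (by omega) (by omega) (by omega)
    _ = dieHardLoop (h - 150) 10 2 (t + 30) := pairB (by omega) (by omega) (by omega) (by omega) (by omega) (by omega)

lemma cycleN : ∀ (n : Nat) (h a t : Int), 20 < h - 150 * n → 3 ≤ a → a ≤ 10 →
    dieHardLoop h a 2 t = dieHardLoop (h - 150 * n) a 2 (t + 30 * n) := by
  intro n
  induction n with
  | zero => intro h a t _ _ _; norm_num
  | succ m ih =>
    intro h a t hh h3 h10
    rw [cycleA a t (by push_cast at hh ⊢; omega) h3 h10]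
    rw [ih (h - 150) a (t + 30) (by push_cast at hh ⊢; omega) h3 h10]
    congr 1 <;> push_cast <;> ring

lemma altLoop_eq : ∀ (h a t : Int), 0 < h → 0 < a →
    dieHardAltLoop h a t = dieHardLoop h a 2 t := by
  intro h a t
  induction h, a, t using dieHardAltLoop.induct with
  | case1 h a t hc k ih =>
    intro hh0 ha0
    obtain ⟨hh, ha⟩ := hc
    rw [dieHardAltLoop]
    rw [if_pos ⟨hh, ha⟩]
    have hk : k = min ((h - 4) / 2) ((a - 3) / 8) := by
      simp only [k, PySem.Int.floordiv_eq_ediv_of_pos (by norm_num : (0:Int) < 2),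
        PySem.Int.floordiv_eq_ediv_of_pos (by norm_num : (0:Int) < 8)]
    have hk1 : 1 ≤ k ∧ 2 * k ≤ h - 4 ∧ 8 * k ≤ a - 3 := by rw [hk]; omega
    rw [ih (by omega) (by omega)]
    have := bulkA k.toNat h a t (by omega) (by omega)
    rw [this]; congr 1 <;> omega
  | case2 h a t hc h20 hc2 q ih =>
    intro hh0 ha0
    rw [dieHardAltLoop]
    rw [if_neg hc, if_pos h20, if_pos hc2]
    obtain ⟨h170, h3⟩ := hc2
    have h10 : a ≤ 10 := by omega
    have hq : q = (h - 21) / 150 := by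
      simp only [q, PySem.Int.floordiv_eq_ediv_of_pos (by norm_num : (0:Int) < 150)]
    have hq1 : 1 ≤ q ∧ 150 * q ≤ h - 21 := by rw [hq]; omega
    rw [ih (by omega) ha0]
    have := cycleN q.toNat h a t (by omega) h3 h10
    rw [this]; congr 1 <;> omega
  | case3 h a t hc h20 hc2 ih =>
    intro hh0 ha0
    rw [dieHardAltLoop]
    rw [if_neg hc, if_pos h20, if_neg hc2]
    rw [ih (by omega) (by omega)]
    exact (pairB h20 ha0 (by omega) rfl rfl rfl).symm
  | case4 h a t hc hc2 =>
    intro hh0 ha0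
    rw [dieHardAltLoop]
    rw [if_neg hc, if_neg hc2]
    exact (loopA_exit t hh0 ha0 (by omega) (by omega)).symm

-- ===== VERDICT (by name: the statement is the Claim_ definition above) =====
theorem dieHard_spec : Claim_equal_dieHard := by
  intro h a _
  unfold Spec_dieHard dieHard dieHard_alt
  by_cases hc : h > 0 ∧ a > 0
  · rw [dieHardLoop]
    rw [if_pos hc, if_pos (by norm_num : (-1:Int) ≠ 2)]
    rw [if_neg (by omega : ¬(h ≤ 0 ∨ a ≤ 0))]
    exact (altLoop_eq (h + 3) (a + 2) 1 (by omega) (by omega)).symm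
  · rw [dieHardLoop]
    rw [if_neg hc, if_pos (by omega : h ≤ 0 ∨ a ≤ 0)]
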